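-- pv_equiv track=rewrite | github.com/Taitoos2/non_markovian_qubit_swap | src/logistics/bosons.py | unphysical_state
-- ===== SOURCE A (Python) =====
-- State = tuple[int, ...]
--
-- def unphysical_state(configuration: State, qubits: int) -> bool:
--     """Given a sorted list of occupied modes, check whether a qubit mode
--     appears more than once.
--
--     Args:
--         configuration (State): Sorted tuple with the occupied modes
--         qubits (int): Number of hard-core boson modes >= 0
--
--     Returns:
--         bool: False if state is physical, True if it is not.
--     """
--     last = -1
--     for mode in configuration:
--         if mode >= qubits:
--             return False
--         if last == mode:
--             return True
--         last = mode
--     return False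
-- ===== SOURCE B (Python) =====
-- from itertools import groupby
--
--
-- def unphysical_state(configuration, qubits):
--     cut = next((i for i, m in enumerate(configuration) if m >= qubits),
--                len(configuration))
--     prefix = configuration[:cut]
--     # a mode repeats (adjacently) iff the run-length encoding is shorter
--     return sum(1 for _ in groupby(prefix)) < len(prefix)
-- ===== Notes on version B (the rewrite author's own statement) =====
-- stated objective: alternative
-- what changed: Replaces A's fused guard-and-compare loop with sentinel state (last = -1) by: locate the first out-of-range index, slice the prefix, and detect repetition by run-length counting (groupby) - the prefix has a repeated mode iff it has fewer maximal runs than elements.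
-- intended difference: On configurations whose first mode is -1 with qubits > -1 and whose in-range prefix has no adjacent duplicates, A returns True because its last = -1 sentinel falsely matches the first mode, while B returns False, the intended value since a single -1 is not a repeated mode. — e.g. on unphysical_state([-1, 0], 3): A returns true, B returns false
import Mathlib
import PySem

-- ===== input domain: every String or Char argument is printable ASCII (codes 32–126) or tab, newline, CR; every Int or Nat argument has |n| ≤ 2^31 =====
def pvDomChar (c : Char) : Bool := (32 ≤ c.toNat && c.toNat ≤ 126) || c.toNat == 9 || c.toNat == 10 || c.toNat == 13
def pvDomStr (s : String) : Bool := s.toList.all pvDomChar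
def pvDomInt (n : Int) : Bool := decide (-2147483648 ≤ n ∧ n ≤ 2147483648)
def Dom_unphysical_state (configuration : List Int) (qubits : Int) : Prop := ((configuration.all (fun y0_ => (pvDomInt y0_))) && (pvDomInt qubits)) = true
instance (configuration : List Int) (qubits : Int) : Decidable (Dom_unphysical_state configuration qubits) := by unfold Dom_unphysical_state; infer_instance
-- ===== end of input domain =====

-- B replaces A's fused guard-and-compare loop with sentinel state (last = -1) by: find the first
-- out-of-range index, slice the prefix, and detect repetition by run-length counting (groupby):
-- the prefix has a repeated mode iff it has fewer maximal runs than elements (alternative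
-- decomposition, same cost); on configurations starting with -1 A's sentinel falsely reports a
-- duplicate — stated below as D_.


-- ===== PORT A =====
-- A's for-loop with early returns and the accumulator `last`, as structural recursion.
def unphysical_state_loop (qubits : Int) (last : Int) : List Int → Bool
  | [] => false
  | mode :: rest =>
    if mode ≥ qubits then false
    else if last = mode then true
    else unphysical_state_loop qubits mode rest

def unphysical_state (configuration : List Int) (qubits : Int) : Bool :=
  unphysical_state_loop qubits (-1) configuration

-- ===== PORT B =====
-- Source B's `next((i for i, m in enumerate(configuration) if m >= qubits), len(configuration))`:
-- index of the first out-of-range mode, or the length if none.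
def pvCut (qubits : Int) : List Int → Nat
  | [] => 0
  | m :: rest => if m ≥ qubits then 0 else 1 + pvCut qubits rest

-- Source B's `sum(1 for _ in groupby(prefix))`: number of maximal runs of equal elements.
def pvRuns : List Int → Nat
  | [] => 0
  | [_] => 1
  | a :: b :: t => (if a == b then 0 else 1) + pvRuns (b :: t)

def unphysical_state_alt (configuration : List Int) (qubits : Int) : Bool :=
  let pref := configuration.take (pvCut qubits configuration)
  decide (pvRuns pref < pref.length)

-- ===== PRECONDITION & SPEC =====
-- On configurations whose first mode is -1 with qubits > -1 and whose in-range prefix has no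
-- adjacent duplicates, A returns True (its last = -1 sentinel falsely matches the first mode)
-- while B returns False, the intended value since a single -1 is not a repeated mode.
def D_unphysical_state (configuration : List Int) (qubits : Int) : Prop :=
  configuration.head? = some (-1) ∧ -1 < qubits ∧
    (∀ i, i < (configuration.takeWhile (fun m => decide (m < qubits))).length - 1 →
      (configuration.takeWhile (fun m => decide (m < qubits))).getD i 0
        ≠ (configuration.takeWhile (fun m => decide (m < qubits))).getD (i + 1) 0)
instance (configuration : List Int) (qubits : Int) : Decidable (D_unphysical_state configuration qubits) := by unfold D_unphysical_state; infer_instance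

def Spec_unphysical_state (configuration : List Int) (qubits : Int) (out : Bool) : Prop :=
  ¬ D_unphysical_state configuration qubits → out = unphysical_state_alt configuration qubits
instance (configuration : List Int) (qubits : Int) (out : Bool) : Decidable (Spec_unphysical_state configuration qubits out) := by unfold Spec_unphysical_state; infer_instance

def pvDiffWitness_unphysical_state : List Int × Int := ([-1, 0], 3)
def pvDiffWitnessOut_unphysical_state : Bool × Bool := (true, false)

-- ===== CLAIM (what is proved, stated in full; the proofs are below) =====
def Claim_unchanged_unphysical_state : Prop := ∀ (configuration : List Int) (qubits : Int), Dom_unphysical_state configuration qubits → Spec_unphysical_state configuration qubits (unphysical_state configuration qubits)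
def Claim_changed_unphysical_state : Prop := Dom_unphysical_state (pvDiffWitness_unphysical_state.1) (pvDiffWitness_unphysical_state.2) ∧ D_unphysical_state (pvDiffWitness_unphysical_state.1) (pvDiffWitness_unphysical_state.2) ∧ unphysical_state (pvDiffWitness_unphysical_state.1) (pvDiffWitness_unphysical_state.2) = pvDiffWitnessOut_unphysical_state.1 ∧ unphysical_state_alt (pvDiffWitness_unphysical_state.1) (pvDiffWitness_unphysical_state.2) = pvDiffWitnessOut_unphysical_state.2 ∧ pvDiffWitnessOut_unphysical_state.1 ≠ pvDiffWitnessOut_unphysical_state.2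
def Claim_exact_unphysical_state : Prop := ∀ (configuration : List Int) (qubits : Int), Dom_unphysical_state configuration qubits → D_unphysical_state configuration qubits → unphysical_state configuration qubits ≠ unphysical_state_alt configuration qubits

-- ===== LEMMAS AND PROOFS =====

-- adjacent-duplicate check, the common characterisation of both sides
def pvAdj : List Int → Bool
  | a :: b :: t => a == b || pvAdj (b :: t)
  | _ => false

-- A's loop computes pvAdj of (last :: in-range prefix)
theorem pv_loop_eq_adj (qubits : Int) (cfg : List Int) : ∀ last : Int,
    unphysical_state_loop qubits last cfg
      = pvAdj (last :: cfg.takeWhile (fun m => decide (m < qubits))) := by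
  induction cfg with
  | nil => intro last; simp [unphysical_state_loop, pvAdj]
  | cons m rest ih =>
    intro last
    by_cases hm : m ≥ qubits
    · have hlt : ¬ (m < qubits) := not_lt.mpr hm
      simp [unphysical_state_loop, hm, List.takeWhile, hlt, pvAdj]
    · have hlt : m < qubits := lt_of_not_ge hm
      by_cases hl : last = m
      · simp [unphysical_state_loop, hm, hl, List.takeWhile, hlt, pvAdj]
      · simp [unphysical_state_loop, hm, hl, List.takeWhile, hlt, pvAdj, ih m]

-- B's slice at the first out-of-range index is the in-range prefix
theorem pv_take_cut (q : Int) : ∀ l : List Int,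
    l.take (pvCut q l) = l.takeWhile (fun m => decide (m < q)) := by
  intro l
  induction l with
  | nil => simp [pvCut]
  | cons m rest ih =>
    by_cases hm : m ≥ q
    · have hlt : ¬ (m < q) := not_lt.mpr hm
      simp [pvCut, hm, List.takeWhile, hlt]
    · have hlt : m < q := lt_of_not_ge hm
      simp [pvCut, hm, List.takeWhile, hlt, Nat.add_comm 1, ih]

-- the run count never exceeds the length, and is strictly smaller iff some run repeats,
-- i.e. iff there is an adjacent duplicate
theorem pv_runs_lt_iff : ∀ l : List Int, pvRuns l ≤ l.length ∧ (pvRuns l < l.length ↔ pvAdj l = true) := by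
  intro l
  induction l with
  | nil => simp [pvRuns, pvAdj]
  | cons a t ih =>
    cases t with
    | nil => simp [pvRuns, pvAdj]
    | cons b t' =>
      obtain ⟨hle, hiff⟩ := ih
      have hle' : pvRuns (b :: t') ≤ t'.length + 1 := by simpa using hle
      have hiff' : pvRuns (b :: t') < t'.length + 1 ↔ pvAdj (b :: t') = true := by
        simpa using hiff
      have hlen : (a :: b :: t').length = t'.length + 2 := by simp
      have hadj : pvAdj (a :: b :: t') = (a == b || pvAdj (b :: t')) := rfl
      by_cases hab : a = b
      · have hbe : (a == b) = true := by simp [hab]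
        have h0 : pvRuns (a :: b :: t') = pvRuns (b :: t') := by
          show (if a == b then 0 else 1) + pvRuns (b :: t') = _
          rw [hbe]; simp
        refine ⟨?_, ?_⟩
        · rw [h0, hlen]; omega
        · rw [h0, hlen, hadj, hbe]
          simp only [Bool.true_or]
          constructor
          · intro _; trivial
          · intro _; omega
      · have hbe : (a == b) = false := by simp [hab]
        have h1 : pvRuns (a :: b :: t') = 1 + pvRuns (b :: t') := by
          show (if a == b then 0 else 1) + pvRuns (b :: t') = _
          rw [hbe]; simp
        refine ⟨?_, ?_⟩
        · rw [h1, hlen]; omega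
        · rw [h1, hlen, hadj, hbe]
          simp only [Bool.false_or]
          constructor
          · intro h; exact hiff'.mp (by omega)
          · intro h; have := hiff'.mpr h; omega

-- a nonempty in-range prefix starts with the configuration's first mode
theorem pv_takeWhile_cons (q c : Int) (cs : List Int) (hc : c < q) :
    (c :: cs).takeWhile (fun m => decide (m < q)) = c :: cs.takeWhile (fun m => decide (m < q)) := by
  simp [List.takeWhile, hc]

-- B computes pvAdj of the in-range prefix
theorem pv_alt_eq_adj (cfg : List Int) (q : Int) :
    unphysical_state_alt cfg q = pvAdj (cfg.takeWhile (fun m => decide (m < q))) := by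
  rw [unphysical_state_alt]
  simp only [pv_take_cut]
  rcases (pv_runs_lt_iff (cfg.takeWhile (fun m => decide (m < q)))) with ⟨_, hiff⟩
  by_cases h : pvAdj (cfg.takeWhile (fun m => decide (m < q))) = true
  · simp [hiff.mpr h, h]
  · simp only [Bool.not_eq_true] at h
    have : ¬ pvRuns (cfg.takeWhile (fun m => decide (m < q)))
        < (cfg.takeWhile (fun m => decide (m < q))).length := fun hlt => by
      simp [hiff.mp hlt] at h
    simp [this, h]

-- pvAdj is the negation of the no-adjacent-duplicates condition used by D_
theorem pv_adj_false_iff : ∀ l : List Int,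
    pvAdj l = false ↔ (∀ i, i < l.length - 1 → l.getD i 0 ≠ l.getD (i + 1) 0) := by
  intro l
  induction l with
  | nil => simp [pvAdj]
  | cons a t ih =>
    cases t with
    | nil => simp [pvAdj]
    | cons b t' =>
      simp only [pvAdj, Bool.or_eq_false_iff, beq_eq_false_iff_ne, ih]
      constructor
      · rintro ⟨hab, h⟩ i hi
        cases i with
        | zero => simpa using hab
        | succ j =>
          have := h j (by simpa using hi)
          simpa using this
      · intro h
        refine ⟨by simpa using h 0 (by simp), ?_⟩
        intro j hj
        have := h (j + 1) (by simpa using hj)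
        simpa using this

-- ===== VERDICT (by name: the statement is the Claim_ definition above) =====
theorem unphysical_state_spec : Claim_unchanged_unphysical_state := by
  intro cfg q _
  unfold Spec_unphysical_state
  intro hnD
  rw [unphysical_state, pv_loop_eq_adj, pv_alt_eq_adj]
  cases hpc : cfg.takeWhile (fun m => decide (m < q)) with
  | nil => simp [pvAdj]
  | cons a t =>
    by_cases ha : (-1 : Int) = a
    · -- first in-range mode is -1: ¬D_ forces an adjacent duplicate in the prefix, both sides true
      have hmem : a ∈ cfg.takeWhile (fun m => decide (m < q)) := by
        rw [hpc]; exact List.mem_cons_self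
      have haq : a < q := by simpa using List.mem_takeWhile_imp hmem
      have hhead : cfg.head? = some (-1) := by
        cases cfg with
        | nil => simp [List.takeWhile] at hpc
        | cons c cs =>
          by_cases hcq : c < q
          · rw [pv_takeWhile_cons q c cs hcq] at hpc
            cases hpc
            simp [ha]
          · simp [List.takeWhile, hcq] at hpc
      have htrue : pvAdj (a :: t) = true := by
        rcases Bool.eq_false_or_eq_true (pvAdj (a :: t)) with ht | hf
        · exact ht
        · exact absurd ⟨hhead, by omega, by rw [hpc]; exact (pv_adj_false_iff _).mp hf⟩ hnD
      simp [pvAdj, htrue]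
    · simp [pvAdj, ha]

theorem unphysical_state_changed : Claim_changed_unphysical_state := by
  unfold Claim_changed_unphysical_state; decide

theorem unphysical_state_tight : Claim_exact_unphysical_state := by
  intro cfg q _ hD
  obtain ⟨hh, hq, hch⟩ := hD
  rw [unphysical_state, pv_loop_eq_adj, pv_alt_eq_adj]
  cases cfg with
  | nil => simp at hh
  | cons c cs =>
    have hc : c = -1 := by simpa using hh
    subst hc
    rw [pv_takeWhile_cons q (-1) cs hq]
    have hB : pvAdj ((-1 : Int) :: cs.takeWhile (fun m => decide (m < q))) = false :=
      (pv_adj_false_iff _).mpr (by rw [pv_takeWhile_cons q (-1) cs hq] at hch; exact hch)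
    have hA : pvAdj ((-1 : Int) :: (-1 : Int) :: cs.takeWhile (fun m => decide (m < q))) = true := by
      simp [pvAdj]
    rw [hA, hB]
    simp
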